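-- pv_equiv track=rewrite | github.com/bubpen/codekata | 프로그래머스/0/181834. l로 만들기/l로 만들기.py | solution
-- ===== SOURCE A (Python) =====
-- def solution(myString):
--     answer = ''
--     for i in myString:
--         if ord(i) < ord('l'):
--             answer = answer + 'l'
--         else:
--             answer = answer + i
--     return answer
-- ===== SOURCE B (Python) =====
-- def solution(myString):
--     n = len(myString)
--     if n == 0:
--         return ''
--     if n == 1:
--         return max(myString, 'l')
--     mid = n // 2
--     return solution(myString[:mid]) + solution(myString[mid:])
-- ===== Notes on version B (the rewrite author's own statement) =====
-- stated objective: alternative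
-- what changed: Replaces the left-to-right conditional accumulate-loop with a branchless divide-and-conquer recursion: split the string in half, recurse on each half and concatenate, and at a one-character leaf return the maximum of that string and the threshold character, with no comparison branch or accumulator.
import Mathlib
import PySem

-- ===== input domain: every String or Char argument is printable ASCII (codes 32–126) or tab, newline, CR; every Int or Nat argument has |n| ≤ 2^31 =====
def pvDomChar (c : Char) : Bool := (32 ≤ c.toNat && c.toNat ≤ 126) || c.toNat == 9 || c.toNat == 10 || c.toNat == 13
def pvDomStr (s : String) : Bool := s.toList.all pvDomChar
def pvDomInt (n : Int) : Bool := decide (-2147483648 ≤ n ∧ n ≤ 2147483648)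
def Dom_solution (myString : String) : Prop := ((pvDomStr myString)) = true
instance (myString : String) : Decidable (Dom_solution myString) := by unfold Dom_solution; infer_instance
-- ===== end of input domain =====

-- B replaces A's conditional accumulate-loop with a branchless divide-and-conquer
-- recursion (split in half, recurse, concatenate; leaf = max(ch,'l')); objective: alternative.


-- ===== PORT A =====
-- A: for each char, append 'l' if ord(i) < ord('l') (= 108), else append the char.
def solution (myString : String) : String :=
  String.mk (myString.toList.foldl
    (fun answer i => if i.toNat < 108 then answer ++ ['l'] else answer ++ [i]) [])

-- ===== PORT B =====
-- B on List Char: empty → '', one char → max(ch,'l') (Python max of two one-char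
-- strings = max of the chars; equal → either, same value), else split at n//2 and
-- recurse on both halves.  s[:mid]/s[mid:] with 0 ≤ mid ≤ len are exactly take/drop.
def solAux : List Char → List Char
  | [] => []
  | [c] => [max c 'l']
  | c1 :: c2 :: rest =>
      solAux ((c1 :: c2 :: rest).take ((c1 :: c2 :: rest).length / 2)) ++
      solAux ((c1 :: c2 :: rest).drop ((c1 :: c2 :: rest).length / 2))
termination_by l => l.length
decreasing_by all_goals (simp [List.length_take, List.length_drop]; omega)

def solution_alt (myString : String) : String := String.mk (solAux myString.toList)

-- ===== PRECONDITION & SPEC =====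
def Spec_solution (myString : String) (out : String) : Prop := out = solution_alt myString
instance (myString : String) (out : String) : Decidable (Spec_solution myString out) := by unfold Spec_solution; infer_instance

-- ===== CLAIM (what is proved, stated in full; the proofs are below) =====
def Claim_equal_solution : Prop := ∀ (myString : String), Dom_solution myString → Spec_solution myString (solution myString)

-- ===== LEMMAS AND PROOFS =====

theorem char_le_iff (c : Char) : c ≤ 'l' ↔ c.toNat ≤ 108 := by
  rw [Char.le_def, UInt32.le_iff_toNat_le]
  rfl

theorem char_max (c : Char) : max c 'l' = if c.toNat < 108 then 'l' else c := by
  rw [max_def]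
  by_cases h : c.toNat < 108
  · rw [if_pos ((char_le_iff c).2 h.le), if_pos h]
  · rw [if_neg h]
    by_cases h2 : c ≤ 'l'
    · have h3 : c.toNat = 108 := le_antisymm ((char_le_iff c).1 h2) (Nat.le_of_not_lt h)
      have h4 : c = 'l' := Char.ext (UInt32.toNat_inj.mp h3)
      rw [if_pos h2, h4]
    · rw [if_neg h2]

theorem solAux_eq (l : List Char) : solAux l = l.map (fun c => max c 'l') := by
  induction l using solAux.induct with
  | case1 => simp [solAux]
  | case2 c => simp [solAux]
  | case3 c1 c2 rest ih1 ih2 =>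
    rw [solAux, ih1, ih2, ← List.map_append, List.take_append_drop]

theorem foldl_eq_map (l : List Char) (acc : List Char) :
    l.foldl (fun answer i => if i.toNat < 108 then answer ++ ['l'] else answer ++ [i]) acc
      = acc ++ l.map (fun c => if c.toNat < 108 then 'l' else c) := by
  induction l generalizing acc with
  | nil => simp
  | cons c rest ih =>
    simp only [List.foldl_cons, List.map_cons, ih]
    split_ifs <;> simp

-- ===== VERDICT (by name: the statement is the Claim_ definition above) =====
theorem solution_spec : Claim_equal_solution := by
  intro myString _
  unfold Spec_solution solution solution_alt
  rw [foldl_eq_map, solAux_eq]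
  simp [char_max]
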